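-- pv_equiv track=rewrite | github.com/svend4/infom | signatures/hexsig.py | packing_number
-- ===== SOURCE A (Python) =====
-- N_NODES   = 64    # 2^6 вершин
--
-- def hamming(a: int, b: int) -> int:
--     return bin(a ^ b).count('1')
--
-- def hamming_ball(center: int, radius: int) -> list[int]:
--     return [h for h in range(N_NODES) if hamming(center, h) <= radius]
--
-- def packing_number(radius: int) -> list[int]:
--     """Жадная упаковка шарами радиуса r — непересекающиеся шестиугольные ячейки."""
--     covered = set()
--     centers = []
--     for h in range(N_NODES):
--         if h not in covered:
--             centers.append(h)
--             covered.update(hamming_ball(h, radius))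
--     return centers
-- ===== SOURCE B (Python) =====
-- def packing_number(radius: int) -> list[int]:
--     """Greedy packing: keep h iff it is farther than radius from every chosen center."""
--     centers = []
--     for h in range(64):
--         if all(bin(h ^ c).count('1') > radius for c in centers):
--             centers.append(h)
--     return centers
-- ===== Notes on version B (the rewrite author's own statement) =====
-- stated objective: simpler
-- what changed: Dropped the covered set and the hamming_ball helper: a candidate is accepted by scanning the already-chosen centers directly (all distances > radius) instead of maintaining a precomputed covered-index set.
import Mathlib
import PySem

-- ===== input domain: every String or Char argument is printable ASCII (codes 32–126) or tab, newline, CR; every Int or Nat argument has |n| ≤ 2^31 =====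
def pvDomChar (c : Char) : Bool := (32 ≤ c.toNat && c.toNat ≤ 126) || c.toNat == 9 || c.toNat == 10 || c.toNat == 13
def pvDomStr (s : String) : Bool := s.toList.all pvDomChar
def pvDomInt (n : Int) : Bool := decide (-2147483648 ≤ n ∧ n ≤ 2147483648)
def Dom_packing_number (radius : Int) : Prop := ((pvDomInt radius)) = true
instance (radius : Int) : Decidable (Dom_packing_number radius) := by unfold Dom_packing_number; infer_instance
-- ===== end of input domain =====

-- B drops A's covered set and hamming_ball helper and instead scans the accumulated
-- centers directly; equal return value proved for every radius.

-- ===== PORT A =====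
-- bin(a ^ b).count('1')  (for any int, bin counts the '1' digits of |n|, = bitCount)
def hamming (a b : Int) : Int :=
  (PySem.Int.bitCount (PySem.Int.bxor a b) : Int)

def hamming_ball (center radius : Int) : List Int :=
  (PySem.List.pyRange 0 64 1).filter (fun h => decide (hamming center h ≤ radius))

def packing_number (radius : Int) : List Int :=
  ((PySem.List.pyRange 0 64 1).foldl
    (fun (st : PySem.Set Int × List Int) h =>
      if ¬ (PySem.Set.contains st.1 h = true) then
        (PySem.Set.update st.1 (hamming_ball h radius), st.2 ++ [h])
      else st)
    (PySem.Set.empty, [])).2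

-- ===== PORT B =====
def packing_number_alt (radius : Int) : List Int :=
  (PySem.List.pyRange 0 64 1).foldl
    (fun centers h =>
      if centers.all (fun c => decide (radius < (PySem.Int.bitCount (PySem.Int.bxor h c) : Int)))
      then centers ++ [h]
      else centers)
    []

-- ===== PRECONDITION & SPEC =====
def Spec_packing_number (radius : Int) (out : List Int) : Prop := out = packing_number_alt radius
instance (radius : Int) (out : List Int) : Decidable (Spec_packing_number radius out) := by unfold Spec_packing_number; infer_instance

-- ===== CLAIM (what is proved, stated in full; the proofs are below) =====
def Claim_equal_packing_number : Prop := ∀ (radius : Int), Dom_packing_number radius → Spec_packing_number radius (packing_number radius)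

-- ===== LEMMAS AND PROOFS =====

lemma mem_hamming_ball {x center radius : Int} :
    x ∈ hamming_ball center radius ↔ (0 ≤ x ∧ x < 64) ∧ hamming center x ≤ radius := by
  simp [hamming_ball, PySem.List.mem_pyRange_one]

-- loop invariant: covered = points of the cube within radius of some chosen center
lemma loop_eq (radius : Int) (L : List Int) (cov cent : List Int)
    (hL : ∀ x ∈ L, 0 ≤ x ∧ x < 64)
    (hinv : ∀ x : Int, 0 ≤ x → x < 64 →
      (x ∈ cov ↔ ∃ c ∈ cent, hamming c x ≤ radius)) :
    (L.foldl
      (fun (st : PySem.Set Int × List Int) h =>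
        if ¬ (PySem.Set.contains st.1 h = true) then
          (PySem.Set.update st.1 (hamming_ball h radius), st.2 ++ [h])
        else st)
      (cov, cent)).2
    = L.foldl
        (fun centers h =>
          if centers.all (fun c => decide (radius < (PySem.Int.bitCount (PySem.Int.bxor h c) : Int))) then centers ++ [h]
          else centers)
        cent := by
  induction L generalizing cov cent with
  | nil => rfl
  | cons h t ih =>
    obtain ⟨hh0, hh1⟩ := hL h (by simp)
    have hcond : (¬ (PySem.Set.contains cov h = true))
        ↔ (cent.all (fun c => decide (radius < (PySem.Int.bitCount (PySem.Int.bxor h c) : Int))) = true) := by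
      rw [PySem.Set.contains_iff, hinv h hh0 hh1]
      simp [List.all_eq_true, hamming, PySem.Int.bxor_comm h]
    by_cases hc : cent.all (fun c => decide (radius < (PySem.Int.bitCount (PySem.Int.bxor h c) : Int))) = true
    · simp only [List.foldl_cons, if_pos (hcond.mpr hc), if_pos hc]
      apply ih _ _ (fun x hx => hL x (by simp [hx]))
      intro x hx0 hx1
      rw [PySem.Set.mem_update, hinv x hx0 hx1, mem_hamming_ball]
      constructor
      · rintro (⟨c, hcm, hle⟩ | ⟨_, hle⟩)
        · exact ⟨c, by simp [hcm], hle⟩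
        · exact ⟨h, by simp, hle⟩
      · rintro ⟨c, hcm, hle⟩
        rcases List.mem_append.mp hcm with hcm | hcm
        · exact Or.inl ⟨c, hcm, hle⟩
        · simp at hcm; subst hcm; exact Or.inr ⟨⟨hx0, hx1⟩, hle⟩
    · have : ¬ ¬ (PySem.Set.contains cov h = true) := by
        intro hno; exact hc (hcond.mp hno)
      simp only [List.foldl_cons, if_neg this, if_neg hc]
      exact ih _ _ (fun x hx => hL x (by simp [hx])) hinv

-- ===== VERDICT (by name: the statement is the Claim_ definition above) =====
theorem packing_number_spec : Claim_equal_packing_number := by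
  intro radius _
  show packing_number radius = packing_number_alt radius
  unfold packing_number packing_number_alt
  apply loop_eq
  · intro x hx
    have := PySem.List.mem_pyRange_one.mp hx
    omega
  · intro x _ _
    simp [PySem.Set.empty]
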